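-- pv_equiv track=rewrite | github.com/zim-desktop-wiki/zim-desktop-wiki | zim/plugins/versioncontrol/git.py | log_to_revision_list
-- ===== SOURCE A (Python) =====
-- def log_to_revision_list(log_op_output):
-- 	versions = []
-- 	(rev, date, user, msg) = (None, None, None, None)
-- 	seenmsg = False
-- 	# seenmsg allow to get the complete commit message which is presented like this:
-- 	#
-- 	# [...]
-- 	# description:
-- 	# here is the
-- 	# commit message
-- 	# the end of it may be detected
-- 	# because of the apparition of a line
-- 	# starting by "changeset:"
-- 	#
-- 	# FIXME: there is a bug which will stop parsing if a blank line is included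
-- 	# in the commit message
-- 	for line in log_op_output:
-- 		if line.startswith('commit '):
-- 			if not rev is None:
-- 				versions.append((rev, date, user, msg))
-- 			(rev, date, user, msg) = (None, None, None, None)
-- 			seenmsg = False
-- 			rev = line[7:].strip()
-- 		elif line.startswith('Author: '):
-- 			user = line[7:].strip()
-- 		elif line.startswith('Date: '):
-- 			date = line[7:].strip()
-- 			seenmsg = True
-- 			msg = ''
-- 		elif seenmsg and line.startswith(' '):
-- 			msg += line[4:]
--
-- 	if not rev is None:
-- 		versions.append((rev, date, user, msg))
--
-- 	versions.reverse()
-- 	return versions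
-- ===== SOURCE B (Python) =====
-- def log_to_revision_list(log_op_output):
--     # Segment the lines into commit blocks (lines before the first 'commit ' header are dropped),
--     # then map each block to its tuple, building the result back-to-front (no final reverse).
--     blocks = []
--     cur = None
--     for line in log_op_output:
--         if line.startswith('commit '):
--             if cur is not None:
--                 blocks.append(cur)
--             cur = [line]
--         elif cur is not None:
--             cur.append(line)
--     if cur is not None:
--         blocks.append(cur)
--
--     out = []
--     for block in blocks:
--         header, body = block[0], block[1:]
--         rev = header[7:].strip()
--         user = None
--         for line in body:
--             if line.startswith('Author: '):
--                 user = line[7:].strip()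
--         # scan the body backwards: the message is the indented lines after the LAST Date line
--         date = msg = None
--         acc = ''
--         for line in reversed(body):
--             if line.startswith('Date: '):
--                 date = line[7:].strip()
--                 msg = acc
--                 break
--             if line.startswith(' '):
--                 acc = line[4:] + acc
--         out.insert(0, (rev, date, user, msg))
--     return out
-- ===== Notes on version B (the rewrite author's own statement) =====
-- stated objective: alternative
-- what changed: Instead of A's single-pass if/elif state machine with a final reverse, B first segments the lines into commit blocks, then maps each block to its tuple via direct scans (last Author line; a backward scan that stops at the last Date line to collect the message), building the result back-to-front so no final reverse is needed.
import Mathlib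
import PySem

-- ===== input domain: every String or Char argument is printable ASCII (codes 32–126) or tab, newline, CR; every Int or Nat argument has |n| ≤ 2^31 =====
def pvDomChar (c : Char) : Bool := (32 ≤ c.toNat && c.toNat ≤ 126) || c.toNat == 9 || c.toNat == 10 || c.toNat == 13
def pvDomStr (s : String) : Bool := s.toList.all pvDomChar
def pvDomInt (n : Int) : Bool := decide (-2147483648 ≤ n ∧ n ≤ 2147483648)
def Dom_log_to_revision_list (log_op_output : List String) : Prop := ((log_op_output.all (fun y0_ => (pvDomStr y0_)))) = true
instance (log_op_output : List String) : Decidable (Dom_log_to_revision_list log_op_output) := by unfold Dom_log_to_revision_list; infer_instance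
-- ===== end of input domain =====

-- B segments the log into commit blocks and maps each block to its tuple with direct scans
-- (last Author line; backward scan for the last Date line and the message), building the
-- result back-to-front instead of running A's single if/elif state machine plus a final reverse.


-- ===== PORT A =====
-- A's loop state: (versions, rev, (date, user, msg, seenmsg)).
-- stepAInner is the Author/Date/indented elif chain of A's loop (it never sees a 'commit ' line).
def stepAInner (s : Option String × Option String × Option String × Bool) (line : String) :
    Option String × Option String × Option String × Bool :=
  match s with
  | (date, user, msg, seenmsg) =>
    if PySem.Str.startswith line "Author: " then
      (date, some (PySem.Str.strip (PySem.Str.slice line (some 7) none)), msg, seenmsg)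
    else if PySem.Str.startswith line "Date: " then
      (some (PySem.Str.strip (PySem.Str.slice line (some 7) none)), user, some "", true)
    else if seenmsg && PySem.Str.startswith line " " then
      (date, user, some (msg.getD "" ++ PySem.Str.slice line (some 4) none), seenmsg)
    else
      (date, user, msg, seenmsg)

def stepA
    (s : List (Option String × Option String × Option String × Option String) ×
         Option String × Option String × Option String × Option String × Bool)
    (line : String) :
    List (Option String × Option String × Option String × Option String) ×
    Option String × Option String × Option String × Option String × Bool :=
  match s with
  | (versions, rev, date, user, msg, seenmsg) =>
    if PySem.Str.startswith line "commit " then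
      ((if rev.isSome then versions ++ [(rev, date, user, msg)] else versions),
       some (PySem.Str.strip (PySem.Str.slice line (some 7) none)), none, none, none, false)
    else
      match stepAInner (date, user, msg, seenmsg) line with
      | (date', user', msg', seenmsg') => (versions, rev, date', user', msg', seenmsg')

def log_to_revision_list (log_op_output : List String) :
    List (Option String × Option String × Option String × Option String) :=
  match log_op_output.foldl stepA ([], none, none, none, none, false) with
  | (versions, rev, date, user, msg, _) =>
    (if rev.isSome then versions ++ [(rev, date, user, msg)] else versions).reverse

-- ===== PORT B =====
-- segmentation into commit blocks; lines before the first 'commit ' header are dropped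
def segStep (s : List (List String) × Option (List String)) (line : String) :
    List (List String) × Option (List String) :=
  if PySem.Str.startswith line "commit " then
    ((match s.2 with | some cur => s.1 ++ [cur] | none => s.1), some [line])
  else
    (s.1, s.2.map (fun cur => cur ++ [line]))

def blocksOf (lines : List String) : List (List String) :=
  match lines.foldl segStep ([], none) with
  | (blocks, some cur) => blocks ++ [cur]
  | (blocks, none) => blocks

-- last 'Author: ' line of the body
def userOf (body : List String) : Option String :=
  body.foldl
    (fun user line =>
      if PySem.Str.startswith line "Author: " then
        some (PySem.Str.strip (PySem.Str.slice line (some 7) none))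
      else user)
    none

-- backward scan over the body (given reversed): stop at the first 'Date: ' line found from
-- the end; acc prepends the indented tails seen so far
def dateMsg : List String → String → Option String × Option String
  | [], _ => (none, none)
  | line :: rest, acc =>
    if PySem.Str.startswith line "Date: " then
      (some (PySem.Str.strip (PySem.Str.slice line (some 7) none)), some acc)
    else
      dateMsg rest (if PySem.Str.startswith line " " then PySem.Str.slice line (some 4) none ++ acc else acc)

def tupleOf (block : List String) :
    Option String × Option String × Option String × Option String :=
  match block with
  | [] => (none, none, none, none)  -- unreachable: blocksOf only builds nonempty blocks
  | header :: body =>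
    match dateMsg body.reverse "" with
    | (date, msg) =>
      (some (PySem.Str.strip (PySem.Str.slice header (some 7) none)), date, userOf body, msg)

def log_to_revision_list_alt (log_op_output : List String) :
    List (Option String × Option String × Option String × Option String) :=
  (blocksOf log_op_output).foldl (fun out block => tupleOf block :: out) []

-- ===== PRECONDITION & SPEC =====
def Spec_log_to_revision_list (log_op_output : List String) (out : List (Option String × Option String × Option String × Option String)) : Prop := out = log_to_revision_list_alt log_op_output
instance (log_op_output : List String) (out : List (Option String × Option String × Option String × Option String)) : Decidable (Spec_log_to_revision_list log_op_output out) := by unfold Spec_log_to_revision_list; infer_instance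

-- ===== CLAIM (what is proved, stated in full; the proofs are below) =====
def Claim_equal_log_to_revision_list : Prop := ∀ (log_op_output : List String), Dom_log_to_revision_list log_op_output → Spec_log_to_revision_list log_op_output (log_to_revision_list log_op_output)

-- ===== LEMMAS AND PROOFS =====

-- a (list-level) string starting with a nonempty prefix has the prefix's first char as its own
theorem startswith_head {l p : List Char} {c : Char} (h : PySem.Chars.startswith l p = true)
    (hc : p.head? = some c) : l.head? = some c := by
  rw [PySem.Chars.startswith_iff] at h
  obtain ⟨t, ht⟩ := h
  cases p with
  | nil => simp at hc
  | cons a as => simp at hc; subst hc; simp [← ht]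

-- a string cannot start with two prefixes that begin with distinct characters
theorem startswith_excl {l p q : List Char} {c d : Char} (hp : p.head? = some c)
    (hq : q.head? = some d) (hcd : c ≠ d) (h : PySem.Chars.startswith l p = true) :
    PySem.Chars.startswith l q = false := by
  cases hx : PySem.Chars.startswith l q
  · rfl
  · have e1 := startswith_head h hp
    have e2 := startswith_head hx hq
    rw [e1] at e2
    exact absurd (by simpa using e2) hcd

-- dateMsg with a nonempty accumulator: same date, the accumulator appended to the message
theorem dateMsg_acc (r : List String) : ∀ acc : String,
    dateMsg r acc = ((dateMsg r "").1, (dateMsg r "").2.map (· ++ acc)) := by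
  induction r with
  | nil => intro acc; simp [dateMsg]
  | cons line rest ih =>
    intro acc
    by_cases hD : PySem.Str.startswith line "Date: " = true
    · simp at hD
      simp [dateMsg, hD, String.empty_append]
    · by_cases hS : PySem.Str.startswith line " " = true
      · simp at hD hS
        simp only [dateMsg]
        simp only [PySem.Str.startswith_eq, String.reduceToList, hD, hS,
          Bool.false_eq_true, if_false, if_true, String.append_empty]
        rw [ih (PySem.Str.slice line (some 4) none ++ acc),
          ih (PySem.Str.slice line (some 4) none)]
        cases (dateMsg rest "").2 with
        | none => simp
        | some m => simp [String.append_assoc]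
      · simp at hD hS
        simp [dateMsg, hD, hS]
        exact ih acc

-- date and msg are simultaneously present or absent
theorem dateMsg_isSome (r : List String) : ∀ acc : String,
    (dateMsg r acc).1.isSome = (dateMsg r acc).2.isSome := by
  induction r with
  | nil => intro acc; simp [dateMsg]
  | cons line rest ih =>
    intro acc
    by_cases hD : PySem.Str.startswith line "Date: " = true
    · simp at hD; simp [dateMsg, hD]
    · simp at hD; simp [dateMsg, hD]; exact ih _

-- the inner elif chain of A, folded over a block body, computes B's three direct scans
theorem inner_eq (body : List String) :
    body.foldl stepAInner (none, none, none, false) =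
      ((dateMsg body.reverse "").1, userOf body, (dateMsg body.reverse "").2,
       (dateMsg body.reverse "").1.isSome) := by
  induction body using List.reverseRecOn with
  | nil => simp [dateMsg, userOf]
  | append_singleton body x ih =>
    rw [List.foldl_append, ih]
    have hrev : (body ++ [x]).reverse = x :: body.reverse := by simp
    have huser : userOf (body ++ [x]) =
        (if PySem.Str.startswith x "Author: " then
          some (PySem.Str.strip (PySem.Str.slice x (some 7) none)) else userOf body) := by
      simp only [userOf, List.foldl_append, List.foldl_cons, List.foldl_nil]
    rw [hrev, huser]
    by_cases hA : PySem.Str.startswith x "Author: " = true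
    · have hD : PySem.Chars.startswith x.toList "Date: ".toList = false := by
        rw [PySem.Str.startswith_eq] at hA
        exact startswith_excl (by decide : ("Author: ".toList).head? = some 'A')
          (by decide : ("Date: ".toList).head? = some 'D') (by decide) hA
      have hS : PySem.Chars.startswith x.toList " ".toList = false := by
        rw [PySem.Str.startswith_eq] at hA
        exact startswith_excl (by decide : ("Author: ".toList).head? = some 'A')
          (by decide : (" ".toList).head? = some ' ') (by decide) hA
      simp at hA hD hS
      simp [stepAInner, dateMsg, hA, hD, hS]
    · by_cases hD : PySem.Str.startswith x "Date: " = true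
      · simp at hA hD
        simp [stepAInner, dateMsg, hA, hD]
      · by_cases hS : PySem.Str.startswith x " " = true
        · have hmsg := dateMsg_isSome body.reverse ""
          simp at hA hD hS
          cases hd : (dateMsg body.reverse "").1 with
          | none =>
            have hm : (dateMsg body.reverse "").2 = none := by
              rw [hd] at hmsg
              cases hx : (dateMsg body.reverse "").2
              · rfl
              · rw [hx] at hmsg; simp at hmsg
            have hacc := dateMsg_acc body.reverse (PySem.Str.slice x (some 4) none)
            simp [stepAInner, dateMsg, hA, hD, hS, hd, hm, hacc, String.append_empty]
          | some d =>
            have hm : ∃ m, (dateMsg body.reverse "").2 = some m := by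
              rw [hd] at hmsg
              cases hx : (dateMsg body.reverse "").2 with
              | none => rw [hx] at hmsg; simp at hmsg
              | some m => exact ⟨m, rfl⟩
            obtain ⟨m, hm⟩ := hm
            have hacc := dateMsg_acc body.reverse (PySem.Str.slice x (some 4) none)
            simp [stepAInner, dateMsg, hA, hD, hS, hd, hm, hacc, String.append_empty]
        · simp at hA hD hS
          simp [stepAInner, dateMsg, hA, hD, hS]

-- the coupling invariant between B's current partial block and A's non-versions state
def StInv (cur : Option (List String)) (rev : Option String)
    (date user msg : Option String) (seenmsg : Bool) : Prop :=
  match cur with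
  | none => rev = none
  | some [] => False
  | some (header :: body) =>
      rev = some (PySem.Str.strip (PySem.Str.slice header (some 7) none)) ∧
      (date, user, msg, seenmsg) = body.foldl stepAInner (none, none, none, false)

-- a partial block's tuple, read off A's state
theorem tuple_of_stinv {header : String} {body : List String} {rev : Option String}
    {date user msg : Option String} {seenmsg : Bool}
    (h : StInv (some (header :: body)) rev date user msg seenmsg) :
    (rev, date, user, msg) = tupleOf (header :: body) := by
  obtain ⟨hrev, hist⟩ := h
  rw [inner_eq body] at hist
  simp only [Prod.mk.injEq] at hist
  obtain ⟨h1, h2, h3, _⟩ := hist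
  simp [tupleOf, hrev, h1, h2, h3]

-- one step preserves the coupling between segStep and stepA
theorem step_couple (line : String) (blocks : List (List String)) (cur : Option (List String))
    (versions : List (Option String × Option String × Option String × Option String))
    (rev : Option String) (date user msg : Option String) (seenmsg : Bool)
    (hv : versions = blocks.map tupleOf) (hinv : StInv cur rev date user msg seenmsg) :
    ∃ rev' date' user' msg' seenmsg',
      stepA (versions, rev, date, user, msg, seenmsg) line =
        ((segStep (blocks, cur) line).1.map tupleOf, rev', date', user', msg', seenmsg') ∧
      StInv (segStep (blocks, cur) line).2 rev' date' user' msg' seenmsg' := by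
  by_cases hc : PySem.Str.startswith line "commit " = true
  · refine ⟨some (PySem.Str.strip (PySem.Str.slice line (some 7) none)),
      none, none, none, false, ?_, ?_⟩
    · cases cur with
      | none =>
        have hrev : rev = none := hinv
        simp at hc
        simp [stepA, segStep, hc, hrev, hv]
      | some c =>
        cases c with
        | nil => exact absurd hinv (by simp [StInv])
        | cons header body =>
          have ht := tuple_of_stinv hinv
          have hrevS : rev.isSome = true := by
            obtain ⟨hrev, _⟩ := hinv; rw [hrev]; rfl
          simp at hc
          simp [stepA, segStep, hc, hrevS, hv, ← ht]
    · simp at hc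
      simp only [segStep]
      simp [hc]
      exact ⟨rfl, rfl⟩
  · rcases hstep : stepAInner (date, user, msg, seenmsg) line with ⟨date', user', msg', seenmsg'⟩
    refine ⟨rev, date', user', msg', seenmsg', ?_, ?_⟩
    · simp at hc
      simp [stepA, segStep, hc, hstep, hv]
    · simp at hc
      cases cur with
      | none =>
        have hrev : rev = none := hinv
        simp [segStep, hc]
        exact hrev
      | some c =>
        cases c with
        | nil => exact absurd hinv (by simp [StInv])
        | cons header body =>
          obtain ⟨hrev, hist⟩ := hinv
          simp [segStep, hc]
          refine ⟨hrev, ?_⟩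
          rw [List.foldl_append, ← hist]
          simp [hstep]

-- folding the whole line list preserves the coupling
theorem fold_couple (lines : List String) :
    ∀ (blocks : List (List String)) (cur : Option (List String))
      (versions : List (Option String × Option String × Option String × Option String))
      (rev : Option String) (date user msg : Option String) (seenmsg : Bool),
      versions = blocks.map tupleOf → StInv cur rev date user msg seenmsg →
      ∃ rev' date' user' msg' seenmsg',
        lines.foldl stepA (versions, rev, date, user, msg, seenmsg) =
          ((lines.foldl segStep (blocks, cur)).1.map tupleOf, rev', date', user', msg', seenmsg') ∧
        StInv (lines.foldl segStep (blocks, cur)).2 rev' date' user' msg' seenmsg' := by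
  induction lines with
  | nil =>
    intro blocks cur versions rev date user msg seenmsg hv hinv
    exact ⟨rev, date, user, msg, seenmsg, by simp [hv], hinv⟩
  | cons line rest ih =>
    intro blocks cur versions rev date user msg seenmsg hv hinv
    obtain ⟨rev1, date1, user1, msg1, seen1, hstep, hinv1⟩ :=
      step_couple line blocks cur versions rev date user msg seenmsg hv hinv
    obtain ⟨rev', date', user', msg', seen', hfold, hinv'⟩ :=
      ih (segStep (blocks, cur) line).1 (segStep (blocks, cur) line).2 _
        rev1 date1 user1 msg1 seen1 rfl hinv1
    refine ⟨rev', date', user', msg', seen', ?_, ?_⟩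
    · rw [List.foldl_cons, hstep, List.foldl_cons, hfold]
    · rw [List.foldl_cons]
      exact hinv'

-- ===== VERDICT (by name: the statement is the Claim_ definition above) =====
theorem log_to_revision_list_spec : Claim_equal_log_to_revision_list := by
  intro lines _
  unfold Spec_log_to_revision_list
  obtain ⟨rev', date', user', msg', seen', hfold, hinv⟩ :=
    fold_couple lines [] none [] none none none none false rfl rfl
  rcases hseg : List.foldl segStep ([], none) lines with ⟨bs, curO⟩
  rw [hseg] at hfold hinv
  unfold log_to_revision_list log_to_revision_list_alt blocksOf
  rw [hfold, List.foldl_flip_cons_eq_append, hseg]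
  cases curO with
  | none =>
    have hrev : rev' = none := hinv
    simp [hrev]
  | some cur =>
    cases cur with
    | nil => exact absurd hinv (by simp [StInv])
    | cons header body =>
      have ht := tuple_of_stinv hinv
      have hrevS : rev'.isSome = true := by
        obtain ⟨hrev, _⟩ := hinv; rw [hrev]; rfl
      simp only [hrevS, if_pos]
      rw [List.map_append, List.map_singleton, ← ht]
      simp
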